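-- pv_equiv track=rewrite | github.com/fatiasss/lei | sem1/fp/extra2/1.py | numberValidate
-- ===== SOURCE A (Python) =====
-- def numberValidate(number):
--     retval= True
--     numericounter=0
--     for char in number:
--             if  (not char.isnumeric() and not char=="+"):
--                 retval= False
--             elif char=="+" and char is not number[0]:
--                 retval= False
--             elif char!="+":
--                 numericounter+=1
--     if numericounter<3:
--             retval=False
--     return retval
-- ===== SOURCE B (Python) =====
-- def numberValidate(number):
--     if number.startswith('+'):
--         rest = number.replace('+', '')
--     elif '+' in number:
--         return False
--     else:
--         rest = number
--     return rest.isnumeric() and len(rest) >= 3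
-- ===== Notes on version B (the rewrite author's own statement) =====
-- stated objective: idiomatic
-- what changed: Replaced the per-character flag-and-counter loop (with its identity test against the first character) by bulk string predicates: startswith, replace, isnumeric and a length check, with no explicit Python-level iteration.
import Mathlib
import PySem

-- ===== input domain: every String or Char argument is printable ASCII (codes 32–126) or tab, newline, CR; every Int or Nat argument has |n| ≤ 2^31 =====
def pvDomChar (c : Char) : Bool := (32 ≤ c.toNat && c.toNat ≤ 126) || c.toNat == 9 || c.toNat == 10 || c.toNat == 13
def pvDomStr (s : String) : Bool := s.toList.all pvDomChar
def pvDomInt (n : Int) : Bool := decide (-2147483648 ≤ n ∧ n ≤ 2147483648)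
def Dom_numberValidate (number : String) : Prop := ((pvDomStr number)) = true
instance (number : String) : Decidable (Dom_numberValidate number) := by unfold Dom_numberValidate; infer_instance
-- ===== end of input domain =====

-- B replaces A's per-character flag-and-counter scan by bulk string predicates
-- (startswith / replace / isnumeric / length); no speed claim, same O(n) cost.

-- ===== PORT A =====
-- char.isnumeric() is ported as PySem.Chars.isdigit: exact on the ASCII domain Dom_,
-- where the numeric characters are exactly '0'..'9'.
-- `char is not number[0]` is ported as inequality with the first character: exact on Dom_,
-- since CPython caches single ASCII-character strings, so `is` coincides with `==` there.
def numberValidate (number : String) : Bool :=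
  let cs := number.toList
  let st := cs.foldl (fun (st : Bool × Nat) c =>
      if !(PySem.Chars.isdigit c) && !(c == '+') then (false, st.2)
      else if (c == '+') && !(cs.head? == some c) then (false, st.2)
      else if c != '+' then (st.1, st.2 + 1)
      else st)
    (true, 0)
  if st.2 < 3 then false else st.1

-- ===== PORT B =====
-- rest.isnumeric() is ported as PySem.Chars.strIsdigit: exact on the ASCII domain Dom_.
def numberValidate_alt (number : String) : Bool :=
  let s := number.toList
  if PySem.Chars.startswith s ['+'] then
    let rest := PySem.Chars.replace s ['+'] []
    PySem.Chars.strIsdigit rest && decide (3 ≤ rest.length)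
  else if PySem.Chars.isIn ['+'] s then
    false
  else
    PySem.Chars.strIsdigit s && decide (3 ≤ s.length)

-- ===== PRECONDITION & SPEC =====
def Spec_numberValidate (number : String) (out : Bool) : Prop := out = numberValidate_alt number
instance (number : String) (out : Bool) : Decidable (Spec_numberValidate number out) := by unfold Spec_numberValidate; infer_instance

-- ===== CLAIM (what is proved, stated in full; the proofs are below) =====
def Claim_equal_numberValidate : Prop := ∀ (number : String), Dom_numberValidate number → Spec_numberValidate number (numberValidate number)

-- ===== LEMMAS AND PROOFS =====

-- Python's s.replace('+', '') on a single-character pattern deletes exactly the '+' characters.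
lemma replace_go_plus (fuel : Nat) (l acc : List Char) (h : l.length ≤ fuel) :
    PySem.Chars.replace.go ['+'] [] fuel l acc = acc.reverse ++ l.filter (· ≠ '+') := by
  induction fuel generalizing l acc with
  | zero =>
    cases l with
    | nil => simp [PySem.Chars.replace.go]
    | cons c t => simp at h
  | succ n ih =>
    cases l with
    | nil => simp [PySem.Chars.replace.go]
    | cons c t =>
      simp only [List.length_cons, Nat.succ_le_succ_iff] at h
      by_cases hc : c = '+'
      · subst hc
        rw [PySem.Chars.replace.go]
        simp [List.isPrefixOf, ih t acc h]
      · have hc' : ('+' == c) = false := by simp [Ne.symm hc]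
        rw [PySem.Chars.replace.go]
        simp [List.isPrefixOf, hc', hc, ih t (c :: acc) h]

lemma replace_plus (s : List Char) :
    PySem.Chars.replace s ['+'] [] = s.filter (· ≠ '+') := by
  simp [PySem.Chars.replace, replace_go_plus s.length s [] (le_refl _)]

-- Invariant of A's scan: the flag records "every char is a digit or '+', and any '+'
-- requires the first character to be '+'"; the counter counts the digits.
lemma foldA (l : List Char) (first : Option Char) (b : Bool) (n : Nat) :
    l.foldl (fun (st : Bool × Nat) c =>
      if !(PySem.Chars.isdigit c) && !(c == '+') then (false, st.2)
      else if (c == '+') && !(first == some c) then (false, st.2)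
      else if c != '+' then (st.1, st.2 + 1)
      else st) (b, n)
    = (b && l.all (fun c => PySem.Chars.isdigit c || c == '+')
         && (!(l.contains '+') || (first == some '+')),
       n + l.countP (fun c => PySem.Chars.isdigit c)) := by
  induction l generalizing b n with
  | nil => simp
  | cons c t ih =>
    rw [List.foldl_cons]
    by_cases hp : c = '+'
    · subst hp
      have hnd : PySem.Chars.isdigit '+' = false := by decide
      by_cases hf : first = some '+'
      · have hstep :
            (if !(PySem.Chars.isdigit '+') && !('+' == '+') then ((false : Bool), n)
             else if ('+' == '+') && !(first == some '+') then (false, n)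
             else if '+' != '+' then (b, n + 1)
             else ((b : Bool), (n : Nat))) = (b, n) := by
          simp [hf]
        rw [hstep, ih]
        simp [hf, hnd]
      · have hstep :
            (if !(PySem.Chars.isdigit '+') && !('+' == '+') then ((false : Bool), n)
             else if ('+' == '+') && !(first == some '+') then (false, n)
             else if '+' != '+' then (b, n + 1)
             else ((b : Bool), (n : Nat))) = (false, n) := by
          simp [hf]
        rw [hstep, ih]
        simp [hf, hnd]
    · have hne : (c == '+') = false := by simp [hp]
      by_cases hd : PySem.Chars.isdigit c
      · have hstep :
            (if !(PySem.Chars.isdigit c) && !(c == '+') then ((false : Bool), n)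
             else if (c == '+') && !(first == some c) then (false, n)
             else if c != '+' then (b, n + 1)
             else ((b : Bool), (n : Nat))) = (b, n + 1) := by
          simp [hd, hne, hp]
        rw [hstep, ih]
        simp [hd, hne]
        refine ⟨by simp [Ne.symm hp], by omega⟩
      · have hstep :
            (if !(PySem.Chars.isdigit c) && !(c == '+') then ((false : Bool), n)
             else if (c == '+') && !(first == some c) then (false, n)
             else if c != '+' then (b, n + 1)
             else ((b : Bool), (n : Nat))) = (false, n) := by
          simp [hd, hne]
        rw [hstep, ih]
        simp [hd, hne]

-- A's flag "every char is a digit or '+'" said of the non-'+' residue.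
lemma all_digit_P (s : List Char) :
    s.all (fun c => PySem.Chars.isdigit c || c == '+')
      = (s.filter (· ≠ '+')).all PySem.Chars.isdigit := by
  rw [List.all_filter]
  exact List.all_congr rfl (fun a => by by_cases h : a = '+' <;> simp [h, Bool.or_comm])

-- If every non-'+' character is a digit, the digit count is the length of the non-'+' part.
lemma countP_digit_eq (s : List Char)
    (h : (s.filter (· ≠ '+')).all PySem.Chars.isdigit = true) :
    s.countP (fun c => PySem.Chars.isdigit c) = (s.filter (· ≠ '+')).length := by
  induction s with
  | nil => simp
  | cons c t ih =>
    by_cases hp : c = '+'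
    · subst hp
      have hnd : PySem.Chars.isdigit '+' = false := by decide
      simp only [List.filter_cons, show (decide (('+' : Char) ≠ '+')) = false by decide,
        Bool.false_eq_true, if_false] at h ⊢
      simp [hnd, ih h]
    · have hc : (decide (c ≠ '+')) = true := by simp [hp]
      simp only [List.filter_cons, hc, if_true, List.all_cons, Bool.and_eq_true] at h ⊢
      simp [h.1, ih h.2]

-- The residue test through the filter, in pointwise form.
lemma all_filter_digit (s : List Char) :
    (s.filter (· ≠ '+')).all PySem.Chars.isdigit
      = s.all (fun a => decide (a = '+') || PySem.Chars.isdigit a) := by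
  rw [List.all_filter]
  exact List.all_congr rfl (fun a => by by_cases h : a = '+' <;> simp [h])

-- Both tails — A's counter test of the flag, B's isnumeric-and-length test — agree
-- on the non-'+' residue.
lemma tail_eq (s : List Char) :
    (if s.countP (fun c => PySem.Chars.isdigit c) < 3 then false
     else (s.filter (· ≠ '+')).all PySem.Chars.isdigit)
    = (PySem.Chars.strIsdigit (s.filter (· ≠ '+'))
        && decide (3 ≤ (s.filter (· ≠ '+')).length)) := by
  by_cases hall : (s.filter (· ≠ '+')).all PySem.Chars.isdigit = true
  · rw [countP_digit_eq s hall]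
    by_cases hlen : (s.filter (· ≠ '+')).length < 3
    · have h3 : ¬ (3 ≤ (s.filter (· ≠ '+')).length) := by omega
      simp only [hlen, if_true, h3, decide_false, Bool.and_false]
    · have h3 : (3 ≤ (s.filter (· ≠ '+')).length) := by omega
      have hne : (s.filter (· ≠ '+')).isEmpty = false := by
        rw [List.isEmpty_eq_false_iff_exists_mem]
        exact List.exists_mem_of_length_pos (by omega)
      simp only [hlen, if_false, PySem.Chars.strIsdigit, hne, hall, h3,
        Bool.not_false, Bool.and_true, decide_true]
  · have hall2 : (s.all fun a => decide (a = '+') || PySem.Chars.isdigit a) = false := by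
      rw [← all_filter_digit]; simpa using hall
    simp [PySem.Chars.strIsdigit, hall2]

-- ===== VERDICT (by name: the statement is the Claim_ definition above) =====
theorem numberValidate_spec : Claim_equal_numberValidate := by
  intro number _
  simp only [Spec_numberValidate, numberValidate, numberValidate_alt]
  rw [foldA, replace_plus]
  by_cases hstart : PySem.Chars.startswith number.toList ['+'] = true
  · have hhead : number.toList.head? = some '+' := by
      rcases hsl : number.toList with _ | ⟨c, t⟩
      · rw [hsl] at hstart; simp [PySem.Chars.startswith, List.isPrefixOf] at hstart
      · rw [hsl] at hstart
        simp [PySem.Chars.startswith, List.isPrefixOf] at hstart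
        simp [hstart.symm]
    rw [all_digit_P]
    simp only [hstart, if_true, hhead, Bool.true_and, beq_self_eq_true, Bool.or_true,
      Bool.and_true, Nat.zero_add]
    exact tail_eq number.toList
  · have hstart' : PySem.Chars.startswith number.toList ['+'] = false := by
      simpa using hstart
    by_cases hin : PySem.Chars.isIn ['+'] number.toList = true
    · have hmem : '+' ∈ number.toList :=
        (List.singleton_infix_iff '+' number.toList).mp
          ((PySem.Chars.isIn_iff_infix _ _).mp hin)
      have hheadne : (number.toList.head? == some '+') = false := by
        rcases hsl : number.toList with _ | ⟨c, t⟩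
        · simp
        · have : ¬ c = '+' := by
            intro h
            rw [hsl, h] at hstart'
            simp [PySem.Chars.startswith, List.isPrefixOf] at hstart'
          simp [this]
      simp [hstart', hin, hheadne, hmem]
    · have hin' : PySem.Chars.isIn ['+'] number.toList = false := by simpa using hin
      have hmem : ¬ '+' ∈ number.toList := by
        intro h
        rw [PySem.Chars.isIn_eq_false_iff] at hin'
        exact hin' ((List.singleton_infix_iff '+' number.toList).mpr h)
      have hfil : number.toList.filter (· ≠ '+') = number.toList :=
        List.filter_eq_self.mpr (fun a ha => by
          simp only [ne_eq, decide_eq_true_eq]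
          intro h; exact hmem (h ▸ ha))
      have hcont : number.toList.contains '+' = false := by
        simpa using hmem
      rw [all_digit_P, hfil]
      simp only [hstart', hin', Bool.false_eq_true, if_false, Bool.true_and, Nat.zero_add,
        hcont, Bool.not_false, Bool.true_or, Bool.and_true]
      have := tail_eq number.toList
      rw [hfil] at this
      exact this
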